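-- pv_equiv track=rewrite | github.com/1vladal1/Lottery_ideas | Lottery_Keno/ver_0.2/statistics.py | vector_without_last_zeros
-- ===== SOURCE A (Python) =====
-- def vector_without_last_zeros(vector):
--     result = []
--     for i in range(1, len(vector)):
--         if vector[-i:][0] != 0:
--             if i > 1:
--                 result = vector[:-i+1]
--             else:
--                 result = vector
--             break
--     return result
-- ===== SOURCE B (Python) =====
-- def vector_without_last_zeros(vector):
--     last = 0
--     for idx in range(1, len(vector)):
--         if vector[idx] != 0:
--             last = idx
--     return [] if last == 0 else vector[:last + 1]
-- ===== Notes on version B (the rewrite author's own statement) =====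
-- stated objective: simpler
-- what changed: A probes from the back with repeated slices vector[-i:][0] and breaks at the first nonzero, building the result from three different slice branches; B makes one forward pass keeping the last nonzero index among 1..len-1 and does a single slice at the end.
import Mathlib
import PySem

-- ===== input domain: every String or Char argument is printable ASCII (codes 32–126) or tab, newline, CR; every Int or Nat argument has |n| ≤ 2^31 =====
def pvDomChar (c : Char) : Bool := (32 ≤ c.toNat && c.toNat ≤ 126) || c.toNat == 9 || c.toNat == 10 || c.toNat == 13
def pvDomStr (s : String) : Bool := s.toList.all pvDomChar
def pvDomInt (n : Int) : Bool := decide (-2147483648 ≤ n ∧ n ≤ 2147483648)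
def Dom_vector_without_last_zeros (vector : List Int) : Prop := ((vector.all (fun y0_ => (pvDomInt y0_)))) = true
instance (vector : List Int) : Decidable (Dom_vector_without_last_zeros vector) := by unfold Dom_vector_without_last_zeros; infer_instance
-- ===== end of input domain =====

-- B replaces A's break-on-first-hit backward probing via repeated slices `vector[-i:][0]`
-- with one forward pass keeping the last nonzero index and a single final slice
-- (objective: simpler). A may return the original list object itself; the equivalence
-- proved here is about return VALUES.

-- ===== PORT A =====
-- the `for i in range(1, len(vector))` loop with its break; `result` stays [] until the
-- break, so falling off the end returns []. `vector[-i:][0]`: the slice is nonempty for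
-- every i this loop reaches, so the pyGetD default 0 is never consulted.
def pvAGo (vector : List Int) : List Int → List Int
  | [] => []
  | i :: rest =>
    if PySem.List.pyGetD (PySem.List.slice vector (some (-i)) none) 0 0 ≠ 0 then
      if i > 1 then PySem.List.slice vector none (some (-i + 1)) else vector
    else pvAGo vector rest

def vector_without_last_zeros (vector : List Int) : List Int :=
  pvAGo vector (PySem.List.pyRange 1 (vector.length : Int) 1)

-- ===== PORT B =====
def vector_without_last_zeros_alt (vector : List Int) : List Int :=
  let last := (PySem.List.pyRange 1 (vector.length : Int) 1).foldl
    (fun last idx => if PySem.List.pyGetD vector idx 0 ≠ 0 then idx else last) 0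
  if last = 0 then [] else PySem.List.slice vector none (some (last + 1))

-- ===== PRECONDITION & SPEC =====
def Spec_vector_without_last_zeros (vector : List Int) (out : List Int) : Prop := out = vector_without_last_zeros_alt vector
instance (vector : List Int) (out : List Int) : Decidable (Spec_vector_without_last_zeros vector out) := by unfold Spec_vector_without_last_zeros; infer_instance

-- ===== CLAIM (what is proved, stated in full; the proofs are below) =====
def Claim_equal_vector_without_last_zeros : Prop := ∀ (vector : List Int), Dom_vector_without_last_zeros vector → Spec_vector_without_last_zeros vector (vector_without_last_zeros vector)

-- ===== LEMMAS AND PROOFS =====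

-- the element A probes at loop index i = k ≥ 1 is xs[len-k] (index clamped to 0)
lemma pvA_probe (xs : List Int) (k : Nat) (hk : 0 < k) :
    PySem.List.pyGetD (PySem.List.slice xs (some (-(k : Int))) none) 0 0
      = xs[xs.length - k]?.getD 0 := by
  rw [PySem.List.slice_from_neg_natCast xs k hk]
  rw [PySem.List.pyGetD_of_nonneg _ _ (by omega)]
  simp [List.getD, List.getElem?_drop]

-- probing xs ++ [0] at i = k+1 sees the same element as probing xs at i = k
lemma pvA_probe_snoc (xs : List Int) (k : Nat) (hxs : xs ≠ []) (hk : 0 < k) :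
    PySem.List.pyGetD (PySem.List.slice (xs ++ [(0:Int)]) (some (-((k:Int) + 1))) none) 0 0
      = PySem.List.pyGetD (PySem.List.slice xs (some (-(k : Int))) none) 0 0 := by
  have h1 : -((k:Int) + 1) = -(((k+1 : Nat) : Int)) := by push_cast; ring
  rw [h1, pvA_probe (xs ++ [0]) (k+1) (by omega), pvA_probe xs k hk]
  have hlen : 0 < xs.length := List.length_pos_iff.mpr hxs
  have hj : (xs ++ [(0:Int)]).length - (k+1) = xs.length - k := by simp
  rw [hj, List.getElem?_append_left (by omega)]

-- running A's loop over xs ++ [0] with every index shifted by one = running it over xs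
lemma pvAGo_shift (xs : List Int) (hxs : xs ≠ []) :
    ∀ (n : Nat) (a : Int), 1 ≤ a →
      pvAGo (xs ++ [0]) (PySem.List.pyRange (a + 1) (a + 1 + n) 1)
        = pvAGo xs (PySem.List.pyRange a (a + n) 1) := by
  intro n
  induction n with
  | zero =>
    intro a ha
    rw [PySem.List.pyRange_one_eq_nil (by omega), PySem.List.pyRange_one_eq_nil (by omega)]
    simp [pvAGo]
  | succ n ih =>
    intro a ha
    have hlen : 0 < xs.length := List.length_pos_iff.mpr hxs
    rw [PySem.List.pyRange_one_cons (by omega : a + 1 < a + 1 + (n+1:Nat)),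
        PySem.List.pyRange_one_cons (by omega : a < a + (n+1:Nat))]
    simp only [pvAGo]
    set k := a.toNat with hk
    have hak : a = (k : Int) := by omega
    rw [hak, pvA_probe_snoc xs k hxs (by omega)]
    by_cases hc : PySem.List.pyGetD (PySem.List.slice xs (some (-(k:Int))) none) 0 0 ≠ 0
    · rw [if_pos hc, if_pos hc, if_pos (by omega : ((k:Int) + 1) > 1)]
      have h2 : -((k:Int) + 1) + 1 = -(k:Int) := by ring
      rw [h2, PySem.List.slice_to_neg_natCast _ k (by omega)]
      have h4 : (xs ++ [(0:Int)]).length - k = xs.length + 1 - k := by simp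
      rw [h4]
      by_cases hk1 : k = 1
      · rw [if_neg (by rw [hk1]; norm_num)]
        rw [hk1]
        have h5 : xs.length + 1 - 1 = xs.length := by omega
        rw [h5, List.take_append_of_le_length (le_refl _), List.take_length]
      · rw [if_pos (by omega : ((k:Int)) > 1)]
        have h3 : -(k:Int) + 1 = -(((k-1 : Nat)) : Int) := by
          push_cast [Nat.cast_sub (by omega : 1 ≤ k)]; ring
        rw [h3, PySem.List.slice_to_neg_natCast _ (k-1) (by omega)]
        rw [List.take_append_of_le_length (by omega)]
        congr 1
        omega
    · rw [if_neg hc, if_neg hc]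
      have h6 : (k:Int) + 1 + (n+1:Nat) = ((k:Int) + 1) + 1 + n := by push_cast; ring
      have h7 : (k:Int) + (n+1:Nat) = ((k:Int) + 1) + n := by push_cast; ring
      rw [h6, h7]
      exact ih ((k:Int)+1) (by omega)

lemma pvA_snoc_zero (xs : List Int) :
    vector_without_last_zeros (xs ++ [0]) = vector_without_last_zeros xs := by
  rcases eq_or_ne xs [] with h | h
  · subst h; decide
  · have hlen : 0 < xs.length := List.length_pos_iff.mpr h
    unfold vector_without_last_zeros
    have hL : ((xs ++ [(0:Int)]).length : Int) = (xs.length : Int) + 1 := by simp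
    rw [hL, PySem.List.pyRange_one_cons (by omega : (1:Int) < (xs.length:Int) + 1)]
    simp only [pvAGo]
    have h1 : -(1:Int) = -((1:Nat):Int) := by norm_cast
    rw [h1, pvA_probe (xs ++ [0]) 1 (by omega)]
    have h2 : ((xs ++ [(0:Int)]).length - 1) = xs.length := by simp
    rw [h2]
    have h3 : (xs ++ [(0:Int)])[xs.length]?.getD 0 = 0 := by simp
    rw [h3, if_neg (by simp)]
    have h5 : (xs.length:Int) + 1 = 1 + 1 + ((xs.length - 1 : Nat) : Int) := by
      push_cast [Nat.cast_sub (by omega : 1 ≤ xs.length)]; ring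
    have h6 : (xs.length:Int) = 1 + ((xs.length - 1 : Nat) : Int) := by
      push_cast [Nat.cast_sub (by omega : 1 ≤ xs.length)]; ring
    rw [h5, pvAGo_shift xs h (xs.length - 1) 1 (by omega), ← h6]

lemma pvA_snoc_nz (xs : List Int) (x : Int) (hx : x ≠ 0) :
    vector_without_last_zeros (xs ++ [x]) = if xs = [] then [] else xs ++ [x] := by
  rcases eq_or_ne xs [] with h | h
  · subst h
    simp only [if_pos]
    unfold vector_without_last_zeros
    rw [PySem.List.pyRange_one_eq_nil (by simp)]
    simp [pvAGo]
  · rw [if_neg h]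
    have hlen : 0 < xs.length := List.length_pos_iff.mpr h
    unfold vector_without_last_zeros
    have hL : ((xs ++ [x]).length : Int) = (xs.length : Int) + 1 := by simp
    rw [hL, PySem.List.pyRange_one_cons (by omega : (1:Int) < (xs.length:Int) + 1)]
    simp only [pvAGo]
    have h1 : -(1:Int) = -((1:Nat):Int) := by norm_cast
    rw [h1, pvA_probe (xs ++ [x]) 1 (by omega)]
    have h2 : ((xs ++ [x]).length - 1) = xs.length := by simp
    rw [h2]
    have h3 : (xs ++ [x])[xs.length]?.getD 0 = x := by simp
    rw [h3, if_pos hx, if_neg (by norm_num)]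

-- B's running `last` always lies in {init} ∪ the scanned index list
lemma pvB_fold_mem (vec : List Int) (L : List Int) (a : Int) :
    L.foldl (fun last idx => if PySem.List.pyGetD vec idx 0 ≠ 0 then idx else last) a ∈ a :: L := by
  induction L generalizing a with
  | nil => simp
  | cons h t ih =>
    simp only [List.foldl_cons]
    split_ifs with hc
    · exact List.mem_cons_of_mem a (ih h)
    · rcases List.mem_cons.mp (ih a) with h2 | h2
      · rw [h2]; exact List.mem_cons_self ..
      · exact List.mem_cons_of_mem _ (List.mem_cons_of_mem _ h2)

lemma pvB_range_snoc (xs : List Int) (x : Int) (hxs : xs ≠ []) :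
    (PySem.List.pyRange 1 ((xs ++ [x]).length : Int) 1) =
      PySem.List.pyRange 1 (xs.length : Int) 1 ++ [(xs.length : Int)] := by
  have h1 : (1:Int) ≤ (xs.length : Int) := by
    have : 0 < xs.length := List.length_pos_iff.mpr hxs
    omega
  have h2 : ((xs ++ [x]).length : Int) = (xs.length : Int) + 1 := by simp
  rw [h2, PySem.List.pyRange_one_succ_right h1]

lemma pvB_getD_snoc (xs : List Int) (x : Int) (i : Int)
    (hi : i ∈ PySem.List.pyRange 1 (xs.length : Int) 1) :
    PySem.List.pyGetD (xs ++ [x]) i 0 = PySem.List.pyGetD xs i 0 := by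
  rw [PySem.List.mem_pyRange_one] at hi
  rw [PySem.List.pyGetD_of_nonneg _ _ (by omega), PySem.List.pyGetD_of_nonneg _ _ (by omega)]
  have hlt : i.toNat < xs.length := by omega
  simp [List.getD, List.getElem?_append_left hlt]

lemma pvB_fold_snoc (xs : List Int) (x : Int) :
    (PySem.List.pyRange 1 (xs.length : Int) 1).foldl
      (fun last idx => if PySem.List.pyGetD (xs ++ [x]) idx 0 ≠ 0 then idx else last) 0
    = (PySem.List.pyRange 1 (xs.length : Int) 1).foldl
      (fun last idx => if PySem.List.pyGetD xs idx 0 ≠ 0 then idx else last) 0 := by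
  apply PySem.List.foldl_congr_mem
  intro acc i hi
  rw [pvB_getD_snoc xs x i hi]

lemma pvB_snoc_zero (xs : List Int) :
    vector_without_last_zeros_alt (xs ++ [0]) = vector_without_last_zeros_alt xs := by
  rcases eq_or_ne xs [] with h | h
  · subst h; decide
  · unfold vector_without_last_zeros_alt
    rw [pvB_range_snoc xs 0 h, List.foldl_append]
    simp only [List.foldl_cons, List.foldl_nil]
    rw [show PySem.List.pyGetD (xs ++ [0]) (xs.length : Int) 0 = 0 by
          rw [PySem.List.pyGetD_of_nonneg _ _ (by omega)]; simp [List.getD]]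
    simp only [ne_eq, not_true_eq_false, if_false]
    rw [pvB_fold_snoc xs 0]
    set last := (PySem.List.pyRange 1 (xs.length : Int) 1).foldl
      (fun last idx => if PySem.List.pyGetD xs idx 0 ≠ 0 then idx else last) 0 with hlast
    rcases eq_or_ne last 0 with h0 | h0
    · simp [h0]
    · have hmem := pvB_fold_mem xs (PySem.List.pyRange 1 (xs.length : Int) 1) 0
      rw [← hlast] at hmem
      rcases List.mem_cons.mp hmem with h2 | h2
      · exact absurd h2 h0
      · rw [PySem.List.mem_pyRange_one] at h2
        simp only [if_neg h0]
        rw [PySem.List.slice_to _ (by omega), PySem.List.slice_to _ (by omega)]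
        exact List.take_append_of_le_length (by omega)

lemma pvB_snoc_nz (xs : List Int) (x : Int) (hx : x ≠ 0) :
    vector_without_last_zeros_alt (xs ++ [x]) = if xs = [] then [] else xs ++ [x] := by
  rcases eq_or_ne xs [] with h | h
  · subst h
    simp only [if_pos]
    unfold vector_without_last_zeros_alt
    rw [PySem.List.pyRange_one_eq_nil (by simp)]
    simp
  · rw [if_neg h]
    unfold vector_without_last_zeros_alt
    rw [pvB_range_snoc xs x h, List.foldl_append]
    simp only [List.foldl_cons, List.foldl_nil]
    have hget : PySem.List.pyGetD (xs ++ [x]) (xs.length : Int) 0 = x := by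
      rw [PySem.List.pyGetD_of_nonneg _ _ (by omega)]; simp [List.getD]
    rw [hget, if_pos hx]
    have hpos : 0 < xs.length := List.length_pos_iff.mpr h
    have hne : (xs.length : Int) ≠ 0 := by exact_mod_cast hpos.ne'
    rw [if_neg hne, PySem.List.slice_to _ (by omega)]
    have ht : ((xs.length : Int) + 1).toNat = xs.length + 1 := by omega
    rw [ht]
    exact List.take_of_length_le (by simp)

lemma pv_main (l : List Int) : vector_without_last_zeros l = vector_without_last_zeros_alt l := by
  induction l using List.reverseRecOn with
  | nil => decide
  | append_singleton xs x ih =>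
    by_cases hx : x = 0
    · subst hx; rw [pvA_snoc_zero, pvB_snoc_zero, ih]
    · rw [pvA_snoc_nz xs x hx, pvB_snoc_nz xs x hx]

-- ===== VERDICT (by name: the statement is the Claim_ definition above) =====
theorem vector_without_last_zeros_spec : Claim_equal_vector_without_last_zeros := by
  intro v _
  exact pv_main v
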